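-- pv_equiv track=rewrite | github.com/willdc4/AG-max-funcao | funcoes.py | verifica_melhor_individuo
-- ===== SOURCE A (Python) =====
-- def funcao_de_x(x):
--     return (x*x) - (3*x) + 4
--
-- def verifica_melhor_individuo(populacao):
--     maior = funcao_de_x(populacao[0])
--     x = populacao[0]
--
--     for i in range(1, len(populacao)):
--         y = funcao_de_x(populacao[i])
--         if(y > maior):
--             maior = y
--             x = populacao[i]
--
--     return [x, maior]
-- ===== SOURCE B (Python) =====
-- def funcao_de_x(x):
--     return (x*x) - (3*x) + 4
--
-- def verifica_melhor_individuo(populacao):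
--     valores = [funcao_de_x(p) for p in populacao]
--     maior = max(valores)
--     return [populacao[valores.index(maior)], maior]
-- ===== Notes on version B (the rewrite author's own statement) =====
-- stated objective: alternative
-- what changed: Replaces A's single fused best-tracking loop (running maior/x updated under a strict-> test) by three separate passes: map all values, take max of the value list, then recover the argmax with first-occurrence .index.
import Mathlib
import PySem

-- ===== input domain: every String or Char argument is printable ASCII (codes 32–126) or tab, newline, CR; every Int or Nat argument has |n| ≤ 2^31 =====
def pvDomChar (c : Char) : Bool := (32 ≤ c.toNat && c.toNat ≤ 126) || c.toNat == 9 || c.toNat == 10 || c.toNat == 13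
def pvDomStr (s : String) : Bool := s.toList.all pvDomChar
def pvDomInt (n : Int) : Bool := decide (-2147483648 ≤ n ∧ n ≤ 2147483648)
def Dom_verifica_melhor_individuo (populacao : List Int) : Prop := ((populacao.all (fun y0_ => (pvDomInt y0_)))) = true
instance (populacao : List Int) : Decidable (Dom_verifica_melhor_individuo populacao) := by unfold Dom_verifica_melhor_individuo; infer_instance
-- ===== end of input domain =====

-- B replaces A's fused best-tracking loop by three passes (map values, max, first-occurrence index); alternative decomposition, same cost.
-- ===== PORT A =====
def funcao_de_x (x : Int) : Int := (x*x) - (3*x) + 4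

def verifica_melhor_individuo (populacao : List Int) : List Int :=
  -- populacao[0] raises IndexError on []; Pre_ excludes it (pyGetD's default is never reached inside Pre_)
  let p0 := PySem.List.pyGetD populacao 0 0
  let r := (PySem.List.pyRange 1 (populacao.length : Int) 1).foldl
    (fun (s : Int × Int) i =>
      if funcao_de_x (PySem.List.pyGetD populacao i 0) > s.1
      then (funcao_de_x (PySem.List.pyGetD populacao i 0), PySem.List.pyGetD populacao i 0)
      else s)
    (funcao_de_x p0, p0)
  [r.2, r.1]

-- ===== PORT B =====
def funcao_de_x_b (x : Int) : Int := (x*x) - (3*x) + 4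

def verifica_melhor_individuo_alt (populacao : List Int) : List Int :=
  let valores := populacao.map funcao_de_x_b
  match PySem.List.max? valores (fun y => y) with   -- max([]) raises ValueError; outside Pre_
  | none => []
  | some maior =>
    match PySem.List.index? valores maior with
    | none => []   -- unreachable: maior ∈ valores
    | some i => [PySem.List.pyGetD populacao (i : Int) 0, maior]

-- ===== PRECONDITION & SPEC =====
-- A raises IndexError (populacao[0]) and B raises ValueError (max of empty) on the empty list.
def Pre_verifica_melhor_individuo (populacao : List Int) : Prop := populacao ≠ []
instance (populacao : List Int) : Decidable (Pre_verifica_melhor_individuo populacao) := by unfold Pre_verifica_melhor_individuo; infer_instance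
def pvWitness_verifica_melhor_individuo : List Int := [0, 3, 3]

def Spec_verifica_melhor_individuo (populacao : List Int) (out : List Int) : Prop := out = verifica_melhor_individuo_alt populacao
instance (populacao : List Int) (out : List Int) : Decidable (Spec_verifica_melhor_individuo populacao out) := by unfold Spec_verifica_melhor_individuo; infer_instance

-- ===== CLAIM (what is proved, stated in full; the proofs are below) =====
def Claim_equal_verifica_melhor_individuo : Prop := ∀ (populacao : List Int), Dom_verifica_melhor_individuo populacao → Pre_verifica_melhor_individuo populacao → Spec_verifica_melhor_individuo populacao (verifica_melhor_individuo populacao)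

-- ===== LEMMAS AND PROOFS =====

-- The common characterisation: (m, x) is 'the max value and the first argmax' of xs.
def GoodPair (xs : List Int) (m x : Int) : Prop :=
  (∀ q ∈ xs, funcao_de_x q ≤ m) ∧
  ∃ i, ∃ h : i < xs.length, xs[i] = x ∧ funcao_de_x x = m ∧
    ∀ j, (hj : j < i) → funcao_de_x (xs[j]'(by omega)) < m

def stepA (s : Int × Int) (q : Int) : Int × Int :=
  if funcao_de_x q > s.1 then (funcao_de_x q, q) else s

lemma goodPair_step {xs : List Int} {m x : Int} (h : GoodPair xs m x) (q : Int) :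
    GoodPair (xs ++ [q]) (stepA (m, x) q).1 (stepA (m, x) q).2 := by
  obtain ⟨hle, i, hi, hxi, hfx, hprev⟩ := h
  unfold stepA
  by_cases hq : funcao_de_x q > m
  · simp only [hq, if_pos]
    refine ⟨?_, xs.length, by simp, by simp, rfl, ?_⟩
    · intro r hr
      rcases List.mem_append.mp hr with h1 | h1
      · exact le_of_lt (lt_of_le_of_lt (hle r h1) hq)
      · rcases List.mem_singleton.mp h1 with rfl
        omega
    · intro j hj
      have hj' : j < xs.length := by simpa using hj
      rw [List.getElem_append_left hj']
      exact lt_of_le_of_lt (hle _ (List.getElem_mem hj')) hq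
  · simp only [hq, if_neg, not_false_iff]
    refine ⟨?_, i, by simp; omega, ?_, hfx, ?_⟩
    · intro r hr
      rcases List.mem_append.mp hr with h1 | h1
      · exact hle r h1
      · rcases List.mem_singleton.mp h1 with rfl
        omega
    · rw [List.getElem_append_left hi]; exact hxi
    · intro j hj
      have hj' : j < xs.length := by omega
      rw [List.getElem_append_left hj']
      exact hprev j hj

lemma goodPair_foldl (p : Int) (rest : List Int) :
    GoodPair (p :: rest) (rest.foldl stepA (funcao_de_x p, p)).1
      (rest.foldl stepA (funcao_de_x p, p)).2 := by
  induction rest using List.reverseRecOn with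
  | nil =>
    exact ⟨by simp, 0, by simp, by simp, rfl, by omega⟩
  | append_singleton l q ih =>
    rw [List.foldl_append, List.foldl_cons, List.foldl_nil]
    have := goodPair_step ih q
    simpa using this

lemma goodPair_unique {xs : List Int} {m x m' x' : Int}
    (h : GoodPair xs m x) (h' : GoodPair xs m' x') : m = m' ∧ x = x' := by
  obtain ⟨hle, i, hi, hxi, hfx, hprev⟩ := h
  obtain ⟨hle', i', hi', hxi', hfx', hprev'⟩ := h'
  have hm : m = m' := by
    have h1 : funcao_de_x x ≤ m' := hle' x (hxi ▸ List.getElem_mem hi)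
    have h2 : funcao_de_x x' ≤ m := hle x' (hxi' ▸ List.getElem_mem hi')
    omega
  subst hm
  have hii : i = i' := by
    by_contra hne
    rcases Nat.lt_or_ge i i' with hlt | hge
    · have := hprev' i hlt
      rw [hxi] at this; omega
    · have hlt : i' < i := by omega
      have := hprev i' hlt
      rw [hxi'] at this; omega
  subst hii
  exact ⟨rfl, hxi.symm.trans hxi'⟩

lemma portA_good (p : Int) (rest : List Int) :
    verifica_melhor_individuo (p :: rest) =
      [((rest.foldl stepA (funcao_de_x p, p)).2), ((rest.foldl stepA (funcao_de_x p, p)).1)] := by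
  have hfold := PySem.List.foldl_pyRange_pyGetD' (p :: rest) (0 : Int) stepA
      (funcao_de_x p, p) (a := 1) (by norm_num)
  unfold verifica_melhor_individuo
  rw [PySem.List.pyGetD_zero_cons]
  show [(((PySem.List.pyRange 1 (((p :: rest).length : Int)) 1).foldl
      (fun (acc : Int × Int) j => stepA acc (PySem.List.pyGetD (p :: rest) j 0))
      (funcao_de_x p, p))).2,
    (((PySem.List.pyRange 1 (((p :: rest).length : Int)) 1).foldl
      (fun (acc : Int × Int) j => stepA acc (PySem.List.pyGetD (p :: rest) j 0))
      (funcao_de_x p, p))).1] = _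
  rw [hfold]
  simp

lemma fx_eq : funcao_de_x_b = funcao_de_x := rfl

-- B's result satisfies GoodPair on a nonempty list.
lemma portB_eq (p : Int) (rest : List Int) :
    ∃ m x, verifica_melhor_individuo_alt (p :: rest) = [x, m] ∧ GoodPair (p :: rest) m x := by
  obtain ⟨M, hM⟩ : ∃ M, PySem.List.max? ((p :: rest).map funcao_de_x_b) (fun y => y) = some M := by
    cases hmax : PySem.List.max? ((p :: rest).map funcao_de_x_b) (fun y => y) with
    | none =>
      have := (PySem.List.max?_eq_none_iff _ _).mp hmax
      simp at this
    | some M => exact ⟨M, rfl⟩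
  have hMmem : M ∈ (p :: rest).map funcao_de_x_b := PySem.List.max?_mem hM
  obtain ⟨i, hidx⟩ : ∃ i, PySem.List.index? ((p :: rest).map funcao_de_x_b) M = some i := by
    have h := (PySem.List.index?_isSome_iff _ _).mpr hMmem
    cases hix : PySem.List.index? ((p :: rest).map funcao_de_x_b) M with
    | none => rw [hix] at h; simp at h
    | some i => exact ⟨i, rfl⟩
  obtain ⟨hilen, hvi, hprev⟩ := PySem.List.getElem_of_index?_eq_some hidx
  have hipop : i < (p :: rest).length := by simpa using hilen
  refine ⟨M, (p :: rest)[i], ?_, ?_, i, hipop, rfl, ?_, ?_⟩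
  · unfold verifica_melhor_individuo_alt
    simp only [hM, hidx]
    rw [PySem.List.pyGetD_natCast]
    rw [List.getD_eq_getElem _ 0 hipop]
  · intro q hq
    have hmem : funcao_de_x_b q ∈ (p :: rest).map funcao_de_x_b := List.mem_map_of_mem hq
    have := PySem.List.max?_isMax hM _ hmem
    simpa [fx_eq] using this
  · have := hvi
    simp only [List.getElem_map] at this
    simpa [fx_eq] using this
  · intro j hj
    have hjpop : j < (p :: rest).length := by omega
    have hjv : j < ((p :: rest).map funcao_de_x_b).length := by simpa using hjpop
    have hne' : ((p :: rest).map funcao_de_x_b)[j] ≠ M := hprev j hj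
    have hle : ((p :: rest).map funcao_de_x_b)[j] ≤ M :=
      PySem.List.max?_isMax hM _ (List.getElem_mem hjv)
    have hlt := lt_of_le_of_ne hle hne'
    simp only [List.getElem_map] at hlt
    simpa [fx_eq] using hlt

-- ===== VERDICT (by name: the statement is the Claim_ definition above) =====
theorem verifica_melhor_individuo_spec : Claim_equal_verifica_melhor_individuo := by
  intro populacao _ hpre
  unfold Spec_verifica_melhor_individuo
  cases populacao with
  | nil => exact absurd rfl hpre
  | cons p rest =>
    obtain ⟨m, x, hB, hBgood⟩ := portB_eq p rest
    have hAgood := goodPair_foldl p rest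
    obtain ⟨hm, hx⟩ := goodPair_unique hAgood hBgood
    rw [portA_good, hB, hm, hx]
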